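-- pv_equiv track=rewrite | github.com/Rupert-WLLP-Bai/HKU-CS | Semester 2/COMP7404D - Computational intelligence and machine learning/a2/p5.py | extract_board_state
-- ===== SOURCE A (Python) =====
-- def extract_board_state(layout):
--     pacman_position = None
--     ghost_positions = []
--     food_positions = []
--     wall_positions = []
--     for i, row in enumerate(layout):
--         for j, cell in enumerate(row):
--             if cell == 'P':
--                 pacman_position = (i, j)
--             elif cell in 'WXYZ':
--                 ghost_positions.append((i, j))
--             elif cell == '.':
--                 food_positions.append((i, j))
--             elif cell == '%':
--                 wall_positions.append((i, j))
--     return pacman_position, ghost_positions, food_positions, wall_positions, (len(layout), len(layout[0]))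
-- ===== SOURCE B (Python) =====
-- def extract_board_state(layout):
--     pacmen = [(i, j) for i, row in enumerate(layout) for j, c in enumerate(row) if c == 'P']
--     pacman_position = pacmen[-1] if pacmen else None
--     ghost_positions = [(i, j) for i, row in enumerate(layout) for j, c in enumerate(row) if c in 'WXYZ']
--     food_positions = [(i, j) for i, row in enumerate(layout) for j, c in enumerate(row) if c == '.']
--     wall_positions = [(i, j) for i, row in enumerate(layout) for j, c in enumerate(row) if c == '%']
--     return pacman_position, ghost_positions, food_positions, wall_positions, (len(layout), len(layout[0]))
-- ===== Notes on version B (the rewrite author's own statement) =====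
-- stated objective: simpler
-- what changed: Replaces the single nested loop with mutable state and an if/elif chain by four independent list comprehensions over the grid (one per output kind, the 'WXYZ'/'.'/'%' filters being provably disjoint with 'P') and takes the last 'P' cell for the pacman position.
-- outside the precondition, e.g. on extract_board_state([]): A raises IndexError, B raises IndexError
import Mathlib
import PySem

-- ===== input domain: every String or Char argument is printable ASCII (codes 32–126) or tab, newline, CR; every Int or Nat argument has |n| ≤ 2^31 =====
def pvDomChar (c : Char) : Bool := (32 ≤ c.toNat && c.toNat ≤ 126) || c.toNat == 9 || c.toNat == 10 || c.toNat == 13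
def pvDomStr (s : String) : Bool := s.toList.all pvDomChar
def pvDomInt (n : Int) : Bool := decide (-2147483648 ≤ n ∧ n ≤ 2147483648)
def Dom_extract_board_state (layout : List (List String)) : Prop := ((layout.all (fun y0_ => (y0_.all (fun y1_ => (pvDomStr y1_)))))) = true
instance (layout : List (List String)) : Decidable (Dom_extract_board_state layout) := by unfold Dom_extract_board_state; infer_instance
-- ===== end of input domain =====

-- B replaces A's single nested loop with mutable state and an if/elif chain by four
-- independent comprehension-style scans, one per output kind (objective: simpler).

-- ===== PORT A =====
-- A's state: (pacman_position, ghost_positions, food_positions, wall_positions)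
def ebsState := Option (Int × Int) × List (Int × Int) × List (Int × Int) × List (Int × Int)

def ebsStepA (i : Int) (st : ebsState) (jc : Int × String) : ebsState :=
  if jc.2 == "P" then (some (i, jc.1), st.2.1, st.2.2.1, st.2.2.2)
  else if PySem.Str.isIn jc.2 "WXYZ" then (st.1, st.2.1 ++ [(i, jc.1)], st.2.2.1, st.2.2.2)
  else if jc.2 == "." then (st.1, st.2.1, st.2.2.1 ++ [(i, jc.1)], st.2.2.2)
  else if jc.2 == "%" then (st.1, st.2.1, st.2.2.1, st.2.2.2 ++ [(i, jc.1)])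
  else st

def extract_board_state (layout : List (List String)) : (Option (Int × Int)) × (List (Int × Int)) × (List (Int × Int)) × (List (Int × Int)) × (Int × Int) :=
  let st : ebsState :=
    (PySem.List.enumerate layout).foldl
      (fun st ir => (PySem.List.enumerate ir.2).foldl (ebsStepA ir.1) st)
      (none, [], [], [])
  -- layout[0] raises IndexError on empty layout; excluded by Pre_
  (st.1, st.2.1, st.2.2.1, st.2.2.2,
    ((layout.length : Int), ((((PySem.List.pyGet? layout 0).getD []).length : Int))))

-- ===== PORT B =====
-- one comprehension '[(i, j) for i, row in enumerate(layout) for j, c in enumerate(row) if p c]'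
def ebsGather (layout : List (List String)) (p : String → Bool) : List (Int × Int) :=
  (PySem.List.enumerate layout).flatMap
    (fun ir => ((PySem.List.enumerate ir.2).filter (fun jc => p jc.2)).map (fun jc => (ir.1, jc.1)))

def extract_board_state_alt (layout : List (List String)) : (Option (Int × Int)) × (List (Int × Int)) × (List (Int × Int)) × (List (Int × Int)) × (Int × Int) :=
  let pacmen := ebsGather layout (fun c => c == "P")
  let pacman_position := if pacmen.isEmpty then none else PySem.List.pyGet? pacmen (-1)
  let ghost_positions := ebsGather layout (fun c => PySem.Str.isIn c "WXYZ")
  let food_positions := ebsGather layout (fun c => c == ".")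
  let wall_positions := ebsGather layout (fun c => c == "%")
  (pacman_position, ghost_positions, food_positions, wall_positions,
    ((layout.length : Int), ((((PySem.List.pyGet? layout 0).getD []).length : Int))))

-- ===== PRECONDITION & SPEC =====
-- A (and B) raise IndexError on the empty layout (layout[0]); Pre_ excludes exactly that input.
def Pre_extract_board_state (layout : List (List String)) : Prop := layout ≠ []
instance (layout : List (List String)) : Decidable (Pre_extract_board_state layout) := by unfold Pre_extract_board_state; infer_instance
def pvWitness_extract_board_state : List (List String) := [["%", ".", "P"], ["W", " "]]

def Spec_extract_board_state (layout : List (List String)) (out : (Option (Int × Int)) × (List (Int × Int)) × (List (Int × Int)) × (List (Int × Int)) × (Int × Int)) : Prop := out = extract_board_state_alt layout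
instance (layout : List (List String)) (out : (Option (Int × Int)) × (List (Int × Int)) × (List (Int × Int)) × (List (Int × Int)) × (Int × Int)) : Decidable (Spec_extract_board_state layout out) := by unfold Spec_extract_board_state; infer_instance

-- ===== CLAIM (what is proved, stated in full; the proofs are below) =====
def Claim_equal_extract_board_state : Prop := ∀ (layout : List (List String)), Dom_extract_board_state layout → Pre_extract_board_state layout → Spec_extract_board_state layout (extract_board_state layout)

-- ===== LEMMAS AND PROOFS =====

-- per-component steps of A's loop (the if/elif chain, split)
def ebsPStep (i : Int) (p : Option (Int × Int)) (jc : Int × String) : Option (Int × Int) :=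
  if jc.2 == "P" then some (i, jc.1) else p
def ebsGStep (i : Int) (g : List (Int × Int)) (jc : Int × String) : List (Int × Int) :=
  if !(jc.2 == "P") && PySem.Str.isIn jc.2 "WXYZ" then g ++ [(i, jc.1)] else g
def ebsFStep (i : Int) (f : List (Int × Int)) (jc : Int × String) : List (Int × Int) :=
  if !(jc.2 == "P") && !(PySem.Str.isIn jc.2 "WXYZ") && (jc.2 == ".") then f ++ [(i, jc.1)] else f
def ebsWStep (i : Int) (w : List (Int × Int)) (jc : Int × String) : List (Int × Int) :=
  if !(jc.2 == "P") && !(PySem.Str.isIn jc.2 "WXYZ") && !(jc.2 == ".") && (jc.2 == "%") then w ++ [(i, jc.1)] else w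

theorem ebs_stepA_split (i : Int) (st : ebsState) (jc : Int × String) :
    ebsStepA i st jc
      = (ebsPStep i st.1 jc, ebsGStep i st.2.1 jc, ebsFStep i st.2.2.1 jc, ebsWStep i st.2.2.2 jc) := by
  unfold ebsStepA ebsPStep ebsGStep ebsFStep ebsWStep
  cases h1 : (jc.2 == "P") <;>
    cases h2 : PySem.Str.isIn jc.2 "WXYZ" <;>
      cases h3 : (jc.2 == ".") <;>
        cases h4 : (jc.2 == "%") <;>
          simp [h1, h2, h3, h4]

theorem ebs_foldA_split (i : Int) (l : List (Int × String)) (p : Option (Int × Int))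
    (g f w : List (Int × Int)) :
    l.foldl (ebsStepA i) (p, g, f, w)
      = (l.foldl (ebsPStep i) p, l.foldl (ebsGStep i) g, l.foldl (ebsFStep i) f, l.foldl (ebsWStep i) w) := by
  induction l generalizing p g f w with
  | nil => rfl
  | cons a l ih => rw [List.foldl_cons, ebs_stepA_split, ih]; rfl

-- the elif guards are redundant: the four cell tests are pairwise exclusive
theorem ebs_G_pred (jc : Int × String) :
    (!(jc.2 == "P") && PySem.Str.isIn jc.2 "WXYZ") = PySem.Str.isIn jc.2 "WXYZ" := by
  cases h1 : (jc.2 == "P")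
  · simp
  · rw [beq_iff_eq] at h1
    simp [h1]; decide
theorem ebs_F_pred (jc : Int × String) :
    (!(jc.2 == "P") && !(PySem.Str.isIn jc.2 "WXYZ") && (jc.2 == ".")) = (jc.2 == ".") := by
  cases h3 : (jc.2 == ".")
  · simp
  · rw [beq_iff_eq] at h3
    simp [h3]; decide
theorem ebs_W_pred (jc : Int × String) :
    (!(jc.2 == "P") && !(PySem.Str.isIn jc.2 "WXYZ") && !(jc.2 == ".") && (jc.2 == "%")) = (jc.2 == "%") := by
  cases h4 : (jc.2 == "%")
  · simp
  · rw [beq_iff_eq] at h4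
    simp [h4]; decide

-- the 'P' overwrite fold: 'last match wins' — it equals the last filtered element (or the start)
theorem ebs_fold_last {gamma beta : Type} (l : List gamma) (pred : gamma → Bool) (v : gamma → beta) (p : Option beta) :
    l.foldl (fun p a => if pred a then some (v a) else p) p
      = ((l.filter pred).map v).getLast?.or p := by
  induction l generalizing p with
  | nil => rfl
  | cons a l ih =>
    rw [List.foldl_cons, List.filter_cons]
    by_cases h : pred a = true
    · rw [if_pos h, if_pos h, ih, List.map_cons]
      cases hl : ((l.filter pred).map v).getLast? with
      | none =>
        rw [List.getLast?_cons, hl]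
        rfl
      | some x =>
        rw [List.getLast?_cons, hl]
        rfl
    · rw [if_neg h, if_neg h, ih]

theorem ebs_p_row (i : Int) (l : List (Int × String)) (p : Option (Int × Int)) :
    l.foldl (ebsPStep i) p
      = ((l.filter (fun jc => jc.2 == "P")).map (fun jc => (i, jc.1))).getLast?.or p :=
  ebs_fold_last l _ _ p

theorem ebs_g_row (i : Int) (l : List (Int × String)) (g : List (Int × Int)) :
    l.foldl (ebsGStep i) g
      = g ++ (l.filter (fun jc => PySem.Str.isIn jc.2 "WXYZ")).map (fun jc => (i, jc.1)) := by
  have : l.foldl (ebsGStep i) g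
      = l.foldl (fun g jc => if PySem.Str.isIn jc.2 "WXYZ" then g ++ [((i : Int), jc.1)] else g) g := by
    apply PySem.List.foldl_congr_mem
    intro g jc _
    rw [ebsGStep, ebs_G_pred jc]
  rw [this, PySem.List.foldl_append_if]

theorem ebs_f_row (i : Int) (l : List (Int × String)) (f : List (Int × Int)) :
    l.foldl (ebsFStep i) f
      = f ++ (l.filter (fun jc => jc.2 == ".")).map (fun jc => (i, jc.1)) := by
  have : l.foldl (ebsFStep i) f
      = l.foldl (fun f jc => if jc.2 == "." then f ++ [((i : Int), jc.1)] else f) f := by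
    apply PySem.List.foldl_congr_mem
    intro f jc _
    rw [ebsFStep, ebs_F_pred jc]
  rw [this, PySem.List.foldl_append_if]

theorem ebs_w_row (i : Int) (l : List (Int × String)) (w : List (Int × Int)) :
    l.foldl (ebsWStep i) w
      = w ++ (l.filter (fun jc => jc.2 == "%")).map (fun jc => (i, jc.1)) := by
  have : l.foldl (ebsWStep i) w
      = l.foldl (fun w jc => if jc.2 == "%" then w ++ [((i : Int), jc.1)] else w) w := by
    apply PySem.List.foldl_congr_mem
    intro w jc _
    rw [ebsWStep, ebs_W_pred jc]
  rw [this, PySem.List.foldl_append_if]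

-- the whole grid loop of A, in closed form over an arbitrary enumerated row list
theorem ebs_grid (L : List (Int × List String)) (p : Option (Int × Int))
    (g f w : List (Int × Int)) :
    L.foldl (fun st ir => (PySem.List.enumerate ir.2).foldl (ebsStepA ir.1) st) (p, g, f, w)
      = ( (L.flatMap (fun ir => ((PySem.List.enumerate ir.2).filter (fun jc => jc.2 == "P")).map (fun jc => (ir.1, jc.1)))).getLast?.or p,
          g ++ L.flatMap (fun ir => ((PySem.List.enumerate ir.2).filter (fun jc => PySem.Str.isIn jc.2 "WXYZ")).map (fun jc => (ir.1, jc.1))),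
          f ++ L.flatMap (fun ir => ((PySem.List.enumerate ir.2).filter (fun jc => jc.2 == ".")).map (fun jc => (ir.1, jc.1))),
          w ++ L.flatMap (fun ir => ((PySem.List.enumerate ir.2).filter (fun jc => jc.2 == "%")).map (fun jc => (ir.1, jc.1))) ) := by
  induction L generalizing p g f w with
  | nil => simp
  | cons a L ih =>
    rw [List.foldl_cons, ebs_foldA_split, ebs_p_row, ebs_g_row, ebs_f_row, ebs_w_row, ih]
    rw [List.flatMap_cons, List.flatMap_cons, List.flatMap_cons, List.flatMap_cons,
      List.getLast?_append, Option.or_assoc, List.append_assoc, List.append_assoc,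
      List.append_assoc]

-- B's 'pacmen[-1] if pacmen else None' is getLast?
theorem ebs_last_pick {beta : Type} (l : List beta) :
    (if l.isEmpty then none else PySem.List.pyGet? l (-1)) = l.getLast? := by
  cases l with
  | nil => rfl
  | cons a l => rw [PySem.List.pyGet?_neg_one]; rfl

theorem extract_board_state_eq (layout : List (List String)) :
    extract_board_state layout = extract_board_state_alt layout := by
  show (_ : (Option (Int × Int)) × _) = _
  rw [extract_board_state, extract_board_state_alt]
  simp only [ebs_grid, ebsGather, ebs_last_pick, List.nil_append, Option.or_none]

-- ===== VERDICT (by name: the statement is the Claim_ definition above) =====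
theorem extract_board_state_spec : Claim_equal_extract_board_state := by
  intro layout _ _
  exact extract_board_state_eq layout
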